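-- pv_equiv track=rewrite | github.com/RodrigoGR22/Practica-Cadena-ABB | corregido.py | verificar_secuencia
-- ===== SOURCE A (Python) =====
-- def verificar_secuencia(cadena):
--     if cadena.endswith("abb"):
--         for char in cadena[:-3]:
--             if char not in 'ab':
--                 return "Cadena rechazada"
--         return "Cadena Aceptada"
--     else:
--         return "Cadena rechazada"
-- ===== SOURCE B (Python) =====
-- import re
--
-- _PATRON = re.compile(r'[ab]*abb')
--
-- def verificar_secuencia(cadena):
--     return "Cadena Aceptada" if _PATRON.fullmatch(cadena) else "Cadena rechazada"
-- ===== Notes on version B (the rewrite author's own statement) =====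
-- stated objective: idiomatic
-- what changed: Replaces the explicit endswith test plus per-character loop over cadena[:-3] by a single anchored regular-expression match re.fullmatch(r'[ab]*abb', cadena), i.e. one finite-automaton pass over the string.
import Mathlib
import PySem

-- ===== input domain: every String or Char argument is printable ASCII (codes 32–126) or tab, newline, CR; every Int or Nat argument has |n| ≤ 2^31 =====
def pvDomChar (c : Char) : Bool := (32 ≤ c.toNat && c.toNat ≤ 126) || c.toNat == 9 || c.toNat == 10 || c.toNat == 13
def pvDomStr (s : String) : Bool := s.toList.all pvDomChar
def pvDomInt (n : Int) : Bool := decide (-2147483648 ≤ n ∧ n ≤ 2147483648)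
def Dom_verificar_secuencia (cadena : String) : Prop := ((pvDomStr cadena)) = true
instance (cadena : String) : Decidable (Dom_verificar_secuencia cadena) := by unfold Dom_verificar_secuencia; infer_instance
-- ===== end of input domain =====

-- B replaces A's endswith test + per-character loop over cadena[:-3] by one anchored
-- regular-expression match re.fullmatch(r'[ab]*abb', cadena) (idiomatic; same cost).


-- ===== PORT A =====
-- the 'for char in cadena[:-3]' loop with its early return; 'char not in 'ab''
-- for a single character is exactly char membership in ['a','b']
def pvLoopA : List Char → String
  | [] => "Cadena Aceptada"
  | c :: rest => if c ∈ ['a', 'b'] then pvLoopA rest else "Cadena rechazada"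

def verificar_secuencia (cadena : String) : String :=
  if PySem.Str.endswith cadena "abb" then
    pvLoopA (PySem.List.slice cadena.toList none (some (-3)))
  else "Cadena rechazada"

-- ===== PORT B =====
-- Source B's re.fullmatch(r'[ab]*abb', cadena) ported as what the regex engine computes:
-- the run of the pattern's minimal DFA over the string (states 0..3 = progress
-- towards the final "abb", accept = 3; state 4 = dead, entered on any char ∉ {a,b})
def pvDelta (q : Nat) (c : Char) : Nat :=
  if c = 'a' then (if q = 4 then 4 else 1)
  else if c = 'b' then (if q = 1 then 2 else if q = 2 then 3 else if q = 4 then 4 else 0)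
  else 4

def verificar_secuencia_alt (cadena : String) : String :=
  if cadena.toList.foldl pvDelta 0 = 3 then "Cadena Aceptada" else "Cadena rechazada"

-- ===== PRECONDITION & SPEC =====
def Spec_verificar_secuencia (cadena : String) (out : String) : Prop := out = verificar_secuencia_alt cadena
instance (cadena : String) (out : String) : Decidable (Spec_verificar_secuencia cadena out) := by unfold Spec_verificar_secuencia; infer_instance

-- ===== CLAIM (what is proved, stated in full; the proofs are below) =====
def Claim_equal_verificar_secuencia : Prop := ∀ (cadena : String), Dom_verificar_secuencia cadena → Spec_verificar_secuencia cadena (verificar_secuencia cadena)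

-- ===== LEMMAS AND PROOFS =====

-- the word of {a,b}-progress a DFA state stands for
def pvStateWord (q : Nat) : List Char :=
  if q = 1 then ['a'] else if q = 2 then ['a', 'b'] else if q = 3 then ['a', 'b', 'b'] else []

theorem pvLoopA_eq (l : List Char) :
    pvLoopA l = if ∀ c ∈ l, c = 'a' ∨ c = 'b' then "Cadena Aceptada" else "Cadena rechazada" := by
  induction l with
  | nil => simp [pvLoopA]
  | cons c rest ih =>
    simp only [pvLoopA, List.mem_cons, ih]
    by_cases hc : c = 'a' ∨ c = 'b' <;> by_cases hr : ∀ x ∈ rest, x = 'a' ∨ x = 'b' <;>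
      simp [hc, hr]

theorem pvDelta_bad (l : List Char) (q : Nat)
    (h : ∃ c ∈ l, ¬(c = 'a' ∨ c = 'b')) : l.foldl pvDelta q = 4 := by
  induction l generalizing q with
  | nil => simp at h
  | cons c rest ih =>
    rcases h with ⟨d, hd, hdbad⟩
    rcases List.mem_cons.mp hd with rfl | hmem
    · have h4 : pvDelta q d = 4 := by
        simp only [pvDelta]
        rw [if_neg (fun h => hdbad (Or.inl h)), if_neg (fun h => hdbad (Or.inr h))]
      rw [List.foldl_cons, h4]
      clear ih hd hdbad
      induction rest with
      | nil => rfl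
      | cons e t iht =>
        have he : pvDelta 4 e = 4 := by
          simp only [pvDelta]; split_ifs <;> omega
        rw [List.foldl_cons, he]; exact iht
    · exact List.foldl_cons .. ▸ ih _ ⟨d, hmem, hdbad⟩

theorem pvDelta_good (l : List Char) (h : ∀ c ∈ l, c = 'a' ∨ c = 'b') :
    ∀ q, q ≤ 3 → (l.foldl pvDelta q = 3 ↔ ['a', 'b', 'b'] <:+ (pvStateWord q ++ l)) := by
  induction l with
  | nil =>
    intro q hq
    interval_cases q <;> simp [pvStateWord] <;> decide
  | cons c rest ih =>
    intro q hq
    have hc := h c (List.mem_cons_self ..)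
    have hr : ∀ x ∈ rest, x = 'a' ∨ x = 'b' := fun x hx => h x (List.mem_cons_of_mem _ hx)
    rw [List.foldl_cons]
    rcases hc with rfl | rfl <;> interval_cases q <;>
      simp only [pvDelta, if_neg (by decide : ¬('b' = 'a')), reduceIte] <;>
      rw [ih hr _ (by decide)] <;>
      simp [pvStateWord, List.suffix_cons_iff]

-- ===== VERDICT (by name: the statement is the Claim_ definition above) =====
theorem verificar_secuencia_spec : Claim_equal_verificar_secuencia := by
  intro cadena _
  unfold Spec_verificar_secuencia verificar_secuencia verificar_secuencia_alt
  have hend : (PySem.Str.endswith cadena "abb" = true) ↔ ['a', 'b', 'b'] <:+ cadena.toList := by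
    simp [PySem.Str.endswith, PySem.Chars.endswith_iff]
  by_cases hall : ∀ c ∈ cadena.toList, c = 'a' ∨ c = 'b'
  · have hB : cadena.toList.foldl pvDelta 0 = 3 ↔ ['a', 'b', 'b'] <:+ cadena.toList := by
      simpa [pvStateWord] using pvDelta_good cadena.toList hall 0 (by decide)
    by_cases hsuf : ['a', 'b', 'b'] <:+ cadena.toList
    · rw [if_pos (hend.mpr hsuf), if_pos (hB.mpr hsuf), pvLoopA_eq, if_pos]
      intro c hc
      rw [PySem.List.slice_to_neg_ofNat cadena.toList 3 (by decide)] at hc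
      exact hall c (List.mem_of_mem_take hc)
    · rw [if_neg (fun h => hsuf (hend.mp h)), if_neg (fun h => hsuf (hB.mp h))]
  · have hB : cadena.toList.foldl pvDelta 0 = 4 := by
      apply pvDelta_bad
      push Not at hall
      obtain ⟨c, hc, h1, h2⟩ := hall
      exact ⟨c, hc, by tauto⟩
    by_cases hendb : PySem.Str.endswith cadena "abb" = true
    · rw [if_pos hendb, if_neg (by rw [hB]; decide)]
      obtain ⟨pre, hpre⟩ := hend.mp hendb
      push Not at hall
      obtain ⟨c, hc, h1, h2⟩ := hall
      have hcpre : c ∈ pre := by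
        rw [← hpre] at hc
        rcases List.mem_append.mp hc with h | h
        · exact h
        · simp at h; tauto
      have hslice : PySem.List.slice cadena.toList none (some (-3)) = pre := by
        rw [PySem.List.slice_to_neg_ofNat cadena.toList 3 (by decide), ← hpre]
        simp
      rw [hslice, pvLoopA_eq, if_neg (fun hf => by have := hf c hcpre; tauto)]
    · rw [if_neg hendb, if_neg (by rw [hB]; decide)]
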